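-- pv_equiv track=rewrite | github.com/zhuli19901106/leetcode-zhuli | algorithms/0501-1000/0959_regions-cut-by-slashes_1_AC.py | zoom
-- ===== SOURCE A (Python) =====
-- def zoom(a0, z):
--     n = len(a0)
--     m = len(a0[0])
--     a = [[0 for j in range(m * z)] for i in range(n * z)]
--     for i in range(n):
--         for j in range(m):
--             if a0[i][j] == r' ':
--                 continue
--             if a0[i][j] == '/':
--                 for ki in range(z):
--                     for kj in range(z):
--                         if ki + kj == z - 1:
--                             a[i * z + ki][j * z + kj] = 1
--             elif a0[i][j] == '\\':
--                 for ki in range(z):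
--                     for kj in range(z):
--                         if ki == kj:
--                             a[i * z + ki][j * z + kj] = 1
--     return a
-- ===== SOURCE B (Python) =====
-- def zoom(a0, z):
--     n, m = len(a0), len(a0[0])
--
--     def pix(r, c):
--         cell = a0[r // z][c // z]
--         if cell == '/':
--             return 1 if r % z + c % z == z - 1 else 0
--         if cell == '\\':
--             return 1 if r % z == c % z else 0
--         return 0
--
--     return [[pix(r, c) for c in range(m * z)] for r in range(n * z)]
-- ===== Notes on version B (the rewrite author's own statement) =====
-- stated objective: simpler
-- what changed: Instead of allocating a zero grid and scattering 1s into it with four nested loops and diagonal filters, B computes each output pixel directly (gather): pixel (r,c) is derived from the source cell a0[r//z][c//z] and the offsets r%z, c%z, so there is no mutable grid and no inner z-by-z scan.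
import Mathlib
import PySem

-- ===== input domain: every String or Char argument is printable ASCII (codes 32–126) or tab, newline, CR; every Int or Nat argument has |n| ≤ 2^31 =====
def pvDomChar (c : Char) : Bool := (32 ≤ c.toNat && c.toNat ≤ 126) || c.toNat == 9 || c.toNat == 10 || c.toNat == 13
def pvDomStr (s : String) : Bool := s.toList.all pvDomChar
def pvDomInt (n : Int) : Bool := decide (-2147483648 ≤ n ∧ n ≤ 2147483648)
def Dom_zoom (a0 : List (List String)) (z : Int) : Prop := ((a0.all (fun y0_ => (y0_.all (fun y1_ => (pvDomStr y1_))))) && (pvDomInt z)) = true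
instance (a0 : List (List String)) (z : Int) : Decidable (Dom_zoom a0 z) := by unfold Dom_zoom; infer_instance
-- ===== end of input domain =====

-- B computes every output pixel directly from its source cell (gather, no mutable grid),
-- replacing A's scatter of 1s through four nested loops; objective: simpler.

-- ===== PORT A =====
-- a[r][c] = v  (both indices are in range whenever A executes this statement)
def gridSet (a : List (List Int)) (r c : Nat) (v : Int) : List (List Int) :=
  a.set r ((a.getD r []).set c v)

-- the zero grid  [[0 for j in range(m*z)] for i in range(n*z)]
-- (for z ≤ 0 Python's range(n*z) is empty and n * z.toNat = 0, so the Nat ranges are exact)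
def zoomGrid0 (n m zn : Nat) : List (List Int) :=
  (List.range (n * zn)).map (fun _ => (List.range (m * zn)).map (fun _ => (0 : Int)))

-- the '/' branch: for ki in range(z): for kj in range(z): if ki+kj == z-1: a[i*z+ki][j*z+kj] = 1
def drawSlash (zn i j : Nat) (a : List (List Int)) : List (List Int) :=
  (List.range zn).foldl (fun a ki =>
    (List.range zn).foldl (fun a kj =>
      if ki + kj = zn - 1 then gridSet a (i * zn + ki) (j * zn + kj) 1 else a) a) a

-- the '\\' branch: if ki == kj: a[i*z+ki][j*z+kj] = 1
def drawBack (zn i j : Nat) (a : List (List Int)) : List (List Int) :=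
  (List.range zn).foldl (fun a ki =>
    (List.range zn).foldl (fun a kj =>
      if ki = kj then gridSet a (i * zn + ki) (j * zn + kj) 1 else a) a) a

-- one (i, j) iteration of A's double loop; a0[i][j] is in range under Pre_zoom, getD is exact there
def zoomBody (a0 : List (List String)) (zn i j : Nat) (a : List (List Int)) : List (List Int) :=
  let cell := (a0.getD i []).getD j ""
  if cell = " " then a
  else if cell = "/" then drawSlash zn i j a
  else if cell = "\\" then drawBack zn i j a
  else a

def zoom (a0 : List (List String)) (z : Int) : List (List Int) :=
  let n := a0.length
  let m := (a0.headD []).length   -- len(a0[0]); Pre_zoom excludes a0 = []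
  let zn := z.toNat               -- range(z) is empty for z ≤ 0, like List.range z.toNat
  (List.range n).foldl (fun a i =>
    (List.range m).foldl (fun a j => zoomBody a0 zn i j a) a) (zoomGrid0 n m zn)

-- ===== PORT B =====
-- pix(r, c) of Source B; only evaluated with 0 < zn, where Nat division equals Python's floor division
def pixAlt (a0 : List (List String)) (zn r c : Nat) : Int :=
  let cell := (a0.getD (r / zn) []).getD (c / zn) ""
  if cell = "/" then (if r % zn + c % zn = zn - 1 then 1 else 0)
  else if cell = "\\" then (if r % zn = c % zn then 1 else 0)
  else 0

def zoom_alt (a0 : List (List String)) (z : Int) : List (List Int) :=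
  let n := a0.length
  let m := (a0.headD []).length   -- len(a0[0]); Pre_zoom excludes a0 = []
  let zn := z.toNat
  (List.range (n * zn)).map (fun r => (List.range (m * zn)).map (fun c => pixAlt a0 zn r c))

-- ===== PRECONDITION & SPEC =====
-- Pre_ excludes exactly the inputs where Python A raises IndexError: empty a0 (a0[0]) and
-- grids whose first row is longer than some other row (a0[i][j] with j < len(a0[0])).
def Pre_zoom (a0 : List (List String)) (z : Int) : Prop :=
  a0 ≠ [] ∧ ∀ row ∈ a0, (a0.headD []).length ≤ row.length
instance (a0 : List (List String)) (z : Int) : Decidable (Pre_zoom a0 z) := by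
  unfold Pre_zoom; infer_instance

def pvWitness_zoom : List (List String) × Int := ([["/", "\\"], [" ", "x"]], 2)

def Spec_zoom (a0 : List (List String)) (z : Int) (out : List (List Int)) : Prop := out = zoom_alt a0 z
instance (a0 : List (List String)) (z : Int) (out : List (List Int)) : Decidable (Spec_zoom a0 z out) := by unfold Spec_zoom; infer_instance

-- ===== CLAIM (what is proved, stated in full; the proofs are below) =====
def Claim_equal_zoom : Prop := ∀ (a0 : List (List String)) (z : Int), Dom_zoom a0 z → Pre_zoom a0 z → Spec_zoom a0 z (zoom a0 z)

-- ===== LEMMAS AND PROOFS =====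

-- entry (r, c) of a grid, 0 outside
def getE (a : List (List Int)) (r c : Nat) : Int := (a.getD r []).getD c 0

-- "f only writes 1s, at the positions where S holds, and preserves an N × M shape"
def GW (N M : Nat) (f : List (List Int) → List (List Int)) (S : Nat → Nat → Bool) : Prop :=
  ∀ a, a.length = N → (∀ row ∈ a, row.length = M) →
    (f a).length = N ∧ (∀ row ∈ f a, row.length = M) ∧
    ∀ r c, getE (f a) r c = if S r c then 1 else getE a r c

theorem gw_id {N M : Nat} : GW N M (fun a => a) (fun _ _ => false) := by
  intro a h1 h2; exact ⟨h1, h2, fun r c => by simp⟩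

theorem gw_comp {N M : Nat} {f g : List (List Int) → List (List Int)} {S T : Nat → Nat → Bool}
    (hf : GW N M f S) (hg : GW N M g T) :
    GW N M (fun a => g (f a)) (fun r c => S r c || T r c) := by
  intro a h1 h2
  obtain ⟨f1, f2, f3⟩ := hf a h1 h2
  obtain ⟨g1, g2, g3⟩ := hg (f a) f1 f2
  refine ⟨g1, g2, fun r c => ?_⟩
  rw [g3 r c, f3 r c]
  cases hS : S r c <;> cases hT : T r c <;> simp [hS, hT]

theorem gw_set {N M : Nat} {r0 c0 : Nat} (hr : r0 < N) (hc : c0 < M) :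
    GW N M (fun a => gridSet a r0 c0 1) (fun r c => decide (r = r0) && decide (c = c0)) := by
  intro a h1 h2
  have hrl : r0 < a.length := h1 ▸ hr
  have hrow : a.getD r0 [] = a[r0] := List.getD_eq_getElem a [] hrl
  have hM : (a[r0]).length = M := h2 _ (a.getElem_mem hrl)
  have hcl : c0 < (a.getD r0 []).length := by rw [hrow, hM]; exact hc
  refine ⟨by simpa [gridSet] using h1, ?_, ?_⟩
  · intro row hrowmem
    rcases List.mem_or_eq_of_mem_set hrowmem with h | h
    · exact h2 _ h
    · subst h; rw [List.length_set, hrow]; exact hM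
  · intro r c
    unfold getE gridSet
    by_cases hre : r = r0
    · subst hre
      rw [List.getD_eq_getElem (a.set r ((a.getD r []).set c0 1)) [] (by simpa using hrl),
        List.getElem_set_self]
      by_cases hce : c = c0
      · subst hce
        rw [List.getD_eq_getElem _ 0 (by simpa using hcl), List.getElem_set_self]
        simp
      · have e2 : ((a.getD r []).set c0 1).getD c 0 = (a.getD r []).getD c 0 := by
          rcases Nat.lt_or_ge c (a.getD r []).length with hlt | hge
          · rw [List.getD_eq_getElem _ 0 (by simpa using hlt), List.getD_eq_getElem _ 0 hlt,
              List.getElem_set_ne (by omega)]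
          · rw [List.getD_eq_default _ 0 (by simpa using hge), List.getD_eq_default _ 0 hge]
        rw [e2]; simp [hce]
    · have e1 : (a.set r0 ((a.getD r0 []).set c0 1)).getD r [] = a.getD r [] := by
        rcases Nat.lt_or_ge r a.length with hlt | hge
        · rw [List.getD_eq_getElem _ [] (by simpa using hlt), List.getD_eq_getElem _ [] hlt,
            List.getElem_set_ne (by omega)]
        · rw [List.getD_eq_default _ [] (by simpa using hge), List.getD_eq_default _ [] hge]
      rw [e1]; simp [hre]

theorem gw_ite {N M : Nat} (p : Prop) [Decidable p] {f : List (List Int) → List (List Int)}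
    {S : Nat → Nat → Bool} (h : GW N M f S) :
    GW N M (fun a => if p then f a else a) (fun r c => decide p && S r c) := by
  by_cases hp : p
  · simp only [hp, if_true, decide_true, Bool.true_and]; exact h
  · simp only [hp, if_false, decide_false, Bool.false_and]; exact gw_id

theorem gw_foldl {α : Type} {N M : Nat} (L : List α)
    (body : List (List Int) → α → List (List Int)) (S : α → Nat → Nat → Bool)
    (h : ∀ x ∈ L, GW N M (fun a => body a x) (S x)) :
    GW N M (fun a => L.foldl body a) (fun r c => L.any (fun x => S x r c)) := by
  induction L with
  | nil => simpa using gw_id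
  | cons x L ih =>
      simp only [List.foldl_cons, List.any_cons]
      exact gw_comp (h x List.mem_cons_self) (ih fun y hy => h y (List.mem_cons_of_mem _ hy))

-- Bool-level description of the positions each piece of A writes to
def slashS (zn i j r c : Nat) : Bool :=
  (List.range zn).any fun ki => (List.range zn).any fun kj =>
    decide (ki + kj = zn - 1) && (decide (r = i * zn + ki) && decide (c = j * zn + kj))

def backS (zn i j r c : Nat) : Bool :=
  (List.range zn).any fun ki => (List.range zn).any fun kj =>
    decide (ki = kj) && (decide (r = i * zn + ki) && decide (c = j * zn + kj))

def cellS (a0 : List (List String)) (zn i j r c : Nat) : Bool :=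
  if (a0.getD i []).getD j "" = " " then false
  else if (a0.getD i []).getD j "" = "/" then slashS zn i j r c
  else if (a0.getD i []).getD j "" = "\\" then backS zn i j r c
  else false

theorem gw_drawSlash {n m zn i j : Nat} (hi : i < n) (hj : j < m) :
    GW (n * zn) (m * zn) (drawSlash zn i j) (slashS zn i j) := by
  unfold drawSlash slashS
  refine gw_foldl _ _ _ (fun ki hki => gw_foldl _ _ _ (fun kj hkj => ?_))
  rw [List.mem_range] at hki hkj
  exact gw_ite _ (gw_set (by nlinarith) (by nlinarith))

theorem gw_drawBack {n m zn i j : Nat} (hi : i < n) (hj : j < m) :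
    GW (n * zn) (m * zn) (drawBack zn i j) (backS zn i j) := by
  unfold drawBack backS
  refine gw_foldl _ _ _ (fun ki hki => gw_foldl _ _ _ (fun kj hkj => ?_))
  rw [List.mem_range] at hki hkj
  exact gw_ite _ (gw_set (by nlinarith) (by nlinarith))

theorem gw_zoomBody {a0 : List (List String)} {n m zn i j : Nat} (hi : i < n) (hj : j < m) :
    GW (n * zn) (m * zn) (zoomBody a0 zn i j) (cellS a0 zn i j) := by
  unfold zoomBody cellS
  by_cases h1 : (a0.getD i []).getD j "" = " "
  · simp only [h1, if_true]; exact gw_id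
  · simp only [h1, if_false]
    by_cases h2 : (a0.getD i []).getD j "" = "/"
    · simp only [h2, if_true]; exact gw_drawSlash hi hj
    · simp only [h2, if_false]
      by_cases h3 : (a0.getD i []).getD j "" = "\\"
      · simp only [h3, if_true]; exact gw_drawBack hi hj
      · simp only [h3, if_false]; exact gw_id

-- unique decomposition r = i*zn + k with k < zn
theorem decomp_iff {zn : Nat} (hzn : 0 < zn) (r i k : Nat) (hk : k < zn) :
    r = i * zn + k ↔ i = r / zn ∧ k = r % zn := by
  constructor
  · rintro rfl
    constructor
    · rw [Nat.mul_comm, Nat.mul_add_div hzn, Nat.div_eq_of_lt hk, Nat.add_zero]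
    · rw [Nat.mul_comm, Nat.mul_add_mod, Nat.mod_eq_of_lt hk]
  · rintro ⟨rfl, rfl⟩
    rw [Nat.mul_comm]
    exact (Nat.div_add_mod r zn).symm

theorem slashS_iff {zn i j r c : Nat} (hzn : 0 < zn) :
    slashS zn i j r c = true ↔
      i = r / zn ∧ j = c / zn ∧ r % zn + c % zn = zn - 1 := by
  unfold slashS
  simp only [List.any_eq_true, List.mem_range, Bool.and_eq_true, decide_eq_true_eq]
  constructor
  · rintro ⟨ki, hki, kj, hkj, hsum, hr, hc⟩
    obtain ⟨hi, hki'⟩ := (decomp_iff hzn r i ki hki).mp hr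
    obtain ⟨hj, hkj'⟩ := (decomp_iff hzn c j kj hkj).mp hc
    exact ⟨hi, hj, by omega⟩
  · rintro ⟨hi, hj, hsum⟩
    exact ⟨r % zn, Nat.mod_lt _ hzn, c % zn, Nat.mod_lt _ hzn, hsum,
      (decomp_iff hzn r i _ (Nat.mod_lt _ hzn)).mpr ⟨hi, rfl⟩,
      (decomp_iff hzn c j _ (Nat.mod_lt _ hzn)).mpr ⟨hj, rfl⟩⟩

theorem backS_iff {zn i j r c : Nat} (hzn : 0 < zn) :
    backS zn i j r c = true ↔
      i = r / zn ∧ j = c / zn ∧ r % zn = c % zn := by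
  unfold backS
  simp only [List.any_eq_true, List.mem_range, Bool.and_eq_true, decide_eq_true_eq]
  constructor
  · rintro ⟨ki, hki, kj, hkj, heq, hr, hc⟩
    obtain ⟨hi, hki'⟩ := (decomp_iff hzn r i ki hki).mp hr
    obtain ⟨hj, hkj'⟩ := (decomp_iff hzn c j kj hkj).mp hc
    exact ⟨hi, hj, by omega⟩
  · rintro ⟨hi, hj, heq⟩
    exact ⟨r % zn, Nat.mod_lt _ hzn, c % zn, Nat.mod_lt _ hzn, heq,
      (decomp_iff hzn r i _ (Nat.mod_lt _ hzn)).mpr ⟨hi, rfl⟩,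
      (decomp_iff hzn c j _ (Nat.mod_lt _ hzn)).mpr ⟨hj, rfl⟩⟩

-- the whole double loop writes exactly the pixels where pixAlt is 1
theorem any_cellS_eq_pix {a0 : List (List String)} {n m zn r c : Nat}
    (hr : r < n * zn) (hc : c < m * zn) :
    (if (List.range n).any (fun i => (List.range m).any (fun j => cellS a0 zn i j r c))
     then (1 : Int) else 0) = pixAlt a0 zn r c := by
  have hzn : 0 < zn := Nat.pos_of_ne_zero (by rintro rfl; omega)
  have hrn : r / zn < n := Nat.div_lt_of_lt_mul (by rw [Nat.mul_comm]; exact hr)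
  have hcm : c / zn < m := Nat.div_lt_of_lt_mul (by rw [Nat.mul_comm]; exact hc)
  have key : (List.range n).any (fun i => (List.range m).any (fun j => cellS a0 zn i j r c)) = true ↔
      ((a0.getD (r / zn) []).getD (c / zn) "" = "/" ∧ r % zn + c % zn = zn - 1) ∨
      ((a0.getD (r / zn) []).getD (c / zn) "" ≠ "/" ∧
       (a0.getD (r / zn) []).getD (c / zn) "" = "\\" ∧ r % zn = c % zn) := by
    simp only [List.any_eq_true, List.mem_range]
    constructor
    · rintro ⟨i, hi, j, hj, hcell⟩
      unfold cellS at hcell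
      by_cases h1 : (a0.getD i []).getD j "" = " "
      · rw [if_pos h1] at hcell; exact Bool.noConfusion hcell
      · rw [if_neg h1] at hcell
        by_cases h2 : (a0.getD i []).getD j "" = "/"
        · rw [if_pos h2] at hcell
          obtain ⟨hi', hj', hs⟩ := (slashS_iff hzn).mp hcell
          subst hi'; subst hj'
          exact Or.inl ⟨h2, hs⟩
        · rw [if_neg h2] at hcell
          by_cases h3 : (a0.getD i []).getD j "" = "\\"
          · rw [if_pos h3] at hcell
            obtain ⟨hi', hj', hs⟩ := (backS_iff hzn).mp hcell
            subst hi'; subst hj'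
            exact Or.inr ⟨h2, h3, hs⟩
          · rw [if_neg h3] at hcell; exact Bool.noConfusion hcell
    · rintro (⟨h2, hs⟩ | ⟨h2, h3, hs⟩)
      · refine ⟨r / zn, hrn, c / zn, hcm, ?_⟩
        unfold cellS
        have h1 : (a0.getD (r / zn) []).getD (c / zn) "" ≠ " " := by rw [h2]; decide
        rw [if_neg h1, if_pos h2]
        exact (slashS_iff hzn).mpr ⟨rfl, rfl, hs⟩
      · refine ⟨r / zn, hrn, c / zn, hcm, ?_⟩
        unfold cellS
        have h1 : (a0.getD (r / zn) []).getD (c / zn) "" ≠ " " := by rw [h3]; decide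
        rw [if_neg h1, if_neg h2, if_pos h3]
        exact (backS_iff hzn).mpr ⟨rfl, rfl, hs⟩
  unfold pixAlt
  by_cases h2 : (a0.getD (r / zn) []).getD (c / zn) "" = "/"
  · simp only [h2, if_true]
    by_cases hs : r % zn + c % zn = zn - 1
    · rw [if_pos (key.mpr (Or.inl ⟨h2, hs⟩)), if_pos hs]
    · rw [if_neg (fun h => by rcases key.mp h with ⟨_, h'⟩ | ⟨h', _⟩ <;> [exact hs h'; exact h' h2]),
        if_neg hs]
  · simp only [h2, if_false]
    by_cases h3 : (a0.getD (r / zn) []).getD (c / zn) "" = "\\"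
    · simp only [h3, if_true]
      by_cases hs : r % zn = c % zn
      · rw [if_pos (key.mpr (Or.inr ⟨h2, h3, hs⟩)), if_pos hs]
      · rw [if_neg (fun h => by rcases key.mp h with ⟨h', _⟩ | ⟨_, _, h'⟩ <;> [exact h2 h'; exact hs h']),
          if_neg hs]
    · simp only [h3, if_false]
      rw [if_neg (fun h => by rcases key.mp h with ⟨h', _⟩ | ⟨_, h', _⟩ <;> [exact h2 h'; exact h3 h'])]

-- shape and entries of the initial grid
theorem grid0_shape (n m zn : Nat) :
    (zoomGrid0 n m zn).length = n * zn ∧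
    (∀ row ∈ zoomGrid0 n m zn, row.length = m * zn) ∧
    ∀ r c, getE (zoomGrid0 n m zn) r c = 0 := by
  refine ⟨by simp [zoomGrid0], ?_, ?_⟩
  · intro row hrow
    simp only [zoomGrid0, List.mem_map] at hrow
    obtain ⟨_, _, rfl⟩ := hrow
    simp
  · intro r c
    unfold getE zoomGrid0
    rcases Nat.lt_or_ge r (n * zn) with hlt | hge
    · rw [List.getD_eq_getElem _ [] (by simpa using hlt)]
      simp only [List.getElem_map]
      rcases Nat.lt_or_ge c (m * zn) with hlt' | hge'
      · rw [List.getD_eq_getElem _ 0 (by simpa using hlt')]; simp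
      · rw [List.getD_eq_default _ 0 (by simpa using hge')]
    · rw [List.getD_eq_default _ [] (by simpa using hge)]; simp

theorem zoom_spec' (a0 : List (List String)) (z : Int) : zoom a0 z = zoom_alt a0 z := by
  set n := a0.length with hn
  set m := (a0.headD []).length with hm
  set zn := z.toNat with hzn
  obtain ⟨g1, g2, g3⟩ := grid0_shape n m zn
  have hGW : GW (n * zn) (m * zn)
      (fun a => (List.range n).foldl (fun a i =>
        (List.range m).foldl (fun a j => zoomBody a0 zn i j a) a) a)
      (fun r c => (List.range n).any (fun i => (List.range m).any (fun j => cellS a0 zn i j r c))) := by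
    refine gw_foldl _ _ _ (fun i hi => gw_foldl _ _ _ (fun j hj => ?_))
    rw [List.mem_range] at hi hj
    exact gw_zoomBody hi hj
  obtain ⟨l1, l2, l3⟩ := hGW (zoomGrid0 n m zn) g1 g2
  have hzoom : zoom a0 z = (List.range n).foldl (fun a i =>
      (List.range m).foldl (fun a j => zoomBody a0 zn i j a) a) (zoomGrid0 n m zn) := rfl
  rw [hzoom]
  have halt : zoom_alt a0 z =
      (List.range (n * zn)).map (fun r => (List.range (m * zn)).map (fun c => pixAlt a0 zn r c)) := rfl
  rw [halt]
  apply List.ext_getElem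
  · simp [l1]
  · intro r h1 h2
    have hr : r < n * zn := by simpa using h2
    simp only [List.getElem_map, List.getElem_range]
    apply List.ext_getElem
    · rw [l2 _ (List.getElem_mem h1)]; simp
    · intro c hc1 hc2
      have hc : c < m * zn := by simpa using hc2
      have e1 : _root_.getE ((List.range n).foldl (fun a i =>
          (List.range m).foldl (fun a j => zoomBody a0 zn i j a) a) (zoomGrid0 n m zn)) r c =
          ((List.range n).foldl (fun a i =>
          (List.range m).foldl (fun a j => zoomBody a0 zn i j a) a) (zoomGrid0 n m zn))[r][c] := by
        unfold getE
        rw [List.getD_eq_getElem _ [] h1, List.getD_eq_getElem _ 0 hc1]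
      rw [List.getElem_map, List.getElem_range, ← e1, l3 r c, g3 r c]
      exact any_cellS_eq_pix hr hc

-- ===== VERDICT (by name: the statement is the Claim_ definition above) =====
theorem zoom_spec : Claim_equal_zoom := by
  intro a0 z _ _
  exact zoom_spec' a0 z
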